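-- pv_equiv track=rewrite | github.com/hidenaka/ekikyou--DB-henka | scripts/quality/coi_registry.py | is_same_group
-- ===== SOURCE A (Python) =====
-- CORPORATE_GROUPS = {
--     'SoftBank': ['Yahoo_Japan', 'LINE', 'PayPay', 'SoftBankVision'],
--     'Google': ['YouTube', 'DeepMind', 'Waymo', 'Fitbit'],
--     'Meta': ['WhatsApp', 'Instagram', 'Oculus'],
--     'Amazon': ['AWS', 'Twitch', 'Whole_Foods', 'MGM'],
--     'Microsoft': ['LinkedIn', 'GitHub', 'Activision_Blizzard', 'OpenAI_Partner'],
--     'SevenAndI': ['SevenEleven', 'Ito_Yokado', 'Sogo_Seibu'],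
--     'FastRetailing': ['UNIQLO', 'GU', 'Theory'],
--     'Rakuten': ['Rakuten_Mobile', 'Rakuten_Bank', 'Rakuten_Travel'],
--     'Sony': ['PlayStation', 'Sony_Music', 'Sony_Pictures', 'Crunchyroll'],
--     'Toyota': ['Lexus', 'Daihatsu', 'Hino'],
--     'LVMH': ['Louis_Vuitton', 'Dior', 'Tiffany', 'Moet_Hennessy'],
-- }
--
-- def is_same_group(company1: str, company2: str) -> bool:
--     """同一企業グループか判定"""
--     if not company1 or not company2:
--         return False
--
--     if company1 == company2:
--         return True
--
--     # グループ内子会社チェック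
--     for parent, subsidiaries in CORPORATE_GROUPS.items():
--         members = [parent] + subsidiaries
--         if company1 in members and company2 in members:
--             return True
--
--     return False
-- ===== SOURCE B (Python) =====
-- CORPORATE_GROUPS = {
--     'SoftBank': ['Yahoo_Japan', 'LINE', 'PayPay', 'SoftBankVision'],
--     'Google': ['YouTube', 'DeepMind', 'Waymo', 'Fitbit'],
--     'Meta': ['WhatsApp', 'Instagram', 'Oculus'],
--     'Amazon': ['AWS', 'Twitch', 'Whole_Foods', 'MGM'],
--     'Microsoft': ['LinkedIn', 'GitHub', 'Activision_Blizzard', 'OpenAI_Partner'],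
--     'SevenAndI': ['SevenEleven', 'Ito_Yokado', 'Sogo_Seibu'],
--     'FastRetailing': ['UNIQLO', 'GU', 'Theory'],
--     'Rakuten': ['Rakuten_Mobile', 'Rakuten_Bank', 'Rakuten_Travel'],
--     'Sony': ['PlayStation', 'Sony_Music', 'Sony_Pictures', 'Crunchyroll'],
--     'Toyota': ['Lexus', 'Daihatsu', 'Hino'],
--     'LVMH': ['Louis_Vuitton', 'Dior', 'Tiffany', 'Moet_Hennessy'],
-- }
--
-- # Flat reverse index: company -> group name, built once.
-- GROUP_INDEX = {member: parent
--                for parent, subsidiaries in CORPORATE_GROUPS.items()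
--                for member in [parent, *subsidiaries]}
--
--
-- def is_same_group(company1: str, company2: str) -> bool:
--     """同一企業グループか判定"""
--     if not company1 or not company2:
--         return False
--
--     if company1 == company2:
--         return True
--
--     g1 = GROUP_INDEX.get(company1)
--     if g1 is None:
--         return False
--     return g1 == GROUP_INDEX.get(company2)
-- ===== Notes on version B (the rewrite author's own statement) =====
-- stated objective: faster
-- what changed: Replaces the per-call scan over all corporate groups with a flat company->group reverse index built once, so each call does two direct lookups instead of iterating every group's member list.
import Mathlib
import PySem

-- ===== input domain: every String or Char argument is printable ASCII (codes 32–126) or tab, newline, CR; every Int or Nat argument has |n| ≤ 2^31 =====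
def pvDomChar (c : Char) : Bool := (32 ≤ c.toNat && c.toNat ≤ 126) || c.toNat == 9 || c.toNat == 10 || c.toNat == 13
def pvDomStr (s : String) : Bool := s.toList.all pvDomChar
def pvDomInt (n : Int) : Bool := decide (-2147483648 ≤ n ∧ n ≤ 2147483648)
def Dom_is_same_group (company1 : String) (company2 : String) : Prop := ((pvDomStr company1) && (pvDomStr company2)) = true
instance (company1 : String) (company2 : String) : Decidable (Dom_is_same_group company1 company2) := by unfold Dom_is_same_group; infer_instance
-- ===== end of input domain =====

-- B replaces A's per-call loop over all groups by a company->group reverse index built once; two lookups per call.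

-- ===== PORT A =====
-- CORPORATE_GROUPS, a dict str -> list[str], as an association list in insertion order
def pvGroups : List (String × List String) :=
  [("SoftBank", ["Yahoo_Japan", "LINE", "PayPay", "SoftBankVision"]),
   ("Google", ["YouTube", "DeepMind", "Waymo", "Fitbit"]),
   ("Meta", ["WhatsApp", "Instagram", "Oculus"]),
   ("Amazon", ["AWS", "Twitch", "Whole_Foods", "MGM"]),
   ("Microsoft", ["LinkedIn", "GitHub", "Activision_Blizzard", "OpenAI_Partner"]),
   ("SevenAndI", ["SevenEleven", "Ito_Yokado", "Sogo_Seibu"]),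
   ("FastRetailing", ["UNIQLO", "GU", "Theory"]),
   ("Rakuten", ["Rakuten_Mobile", "Rakuten_Bank", "Rakuten_Travel"]),
   ("Sony", ["PlayStation", "Sony_Music", "Sony_Pictures", "Crunchyroll"]),
   ("Toyota", ["Lexus", "Daihatsu", "Hino"]),
   ("LVMH", ["Louis_Vuitton", "Dior", "Tiffany", "Moet_Hennessy"])]

-- the for-loop over CORPORATE_GROUPS.items() with its early 'return True'
def pvCheckGroups (company1 : String) (company2 : String) : List (String × List String) → Bool
  | [] => false
  | (parent, subsidiaries) :: rest =>
    let members := parent :: subsidiaries          -- [parent] + subsidiaries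
    if members.contains company1 && members.contains company2 then true
    else pvCheckGroups company1 company2 rest

def is_same_group (company1 : String) (company2 : String) : Bool :=
  if company1 = "" || company2 = "" then false     -- not company1 or not company2
  else if company1 = company2 then true
  else pvCheckGroups company1 company2 pvGroups

-- ===== PORT B =====
-- GROUP_INDEX = {member: parent for parent, subsidiaries in CORPORATE_GROUPS.items()
--                for member in [parent, *subsidiaries]}
-- (keys are pairwise distinct in this data, so the first-match lookup below is exact for the dict)
def pvIndexOf (groups : List (String × List String)) : List (String × String) :=
  groups.flatMap (fun g => (g.1 :: g.2).map (fun m => (m, g.1)))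

def pvGroupIndex : List (String × String) := pvIndexOf pvGroups

def is_same_group_alt (company1 : String) (company2 : String) : Bool :=
  if company1 = "" || company2 = "" then false
  else if company1 = company2 then true
  else
    match pvGroupIndex.lookup company1 with       -- GROUP_INDEX.get(company1)
    | none => false                               -- g1 is None
    | some g1 => some g1 == pvGroupIndex.lookup company2   -- g1 == GROUP_INDEX.get(company2)

-- ===== PRECONDITION & SPEC =====
def Spec_is_same_group (company1 : String) (company2 : String) (out : Bool) : Prop := out = is_same_group_alt company1 company2
instance (company1 : String) (company2 : String) (out : Bool) : Decidable (Spec_is_same_group company1 company2 out) := by unfold Spec_is_same_group; infer_instance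

-- ===== CLAIM (what is proved, stated in full; the proofs are below) =====
def Claim_equal_is_same_group : Prop := ∀ (company1 : String) (company2 : String), Dom_is_same_group company1 company2 → Spec_is_same_group company1 company2 (is_same_group company1 company2)

-- ===== LEMMAS AND PROOFS =====

-- all members of all groups, flattened
def pvAllMembers (groups : List (String × List String)) : List String :=
  groups.flatMap (fun g => g.1 :: g.2)

lemma pv_cons_members (g : String × List String) (rest : List (String × List String)) :
    pvAllMembers (g :: rest) = (g.1 :: g.2) ++ pvAllMembers rest := rfl

lemma pv_cons_index (g : String × List String) (rest : List (String × List String)) :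
    pvIndexOf (g :: rest) = ((g.1 :: g.2).map (fun m => (m, g.1))) ++ pvIndexOf rest := rfl

lemma pv_lookup_map_some {c : String} {m : List String} (p : String) (h : c ∈ m) :
    (m.map (fun x => (x, p))).lookup c = some p := by
  induction m with
  | nil => cases h
  | cons a t ih =>
    by_cases hca : c = a
    · subst hca; simp
    · have hmem : c ∈ t := (List.mem_cons.mp h).resolve_left hca
      have hb : (c == a) = false := beq_eq_false_iff_ne.mpr hca
      simp [List.lookup, hb, ih hmem]

lemma pv_lookup_map_none {c : String} {m : List String} (p : String) (h : c ∉ m) :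
    (m.map (fun x => (x, p))).lookup c = none := by
  induction m with
  | nil => rfl
  | cons a t ih =>
    have hb : (c == a) = false :=
      beq_eq_false_iff_ne.mpr (fun e => h (e ▸ List.mem_cons_self ..))
    have ht : c ∉ t := fun e => h (List.mem_cons_of_mem _ e)
    simp [List.lookup, hb, ih ht]

lemma pv_lookup_append_left {c : String} {l1 l2 : List (String × String)} {v : String}
    (h : l1.lookup c = some v) : (l1 ++ l2).lookup c = some v := by
  induction l1 with
  | nil => simp at h
  | cons a t ih =>
    simp only [List.cons_append, List.lookup] at *
    by_cases hb : c == a.1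
    · simpa [hb] using h
    · simp only [Bool.not_eq_true] at hb
      simp [hb] at h ⊢; exact ih h

lemma pv_lookup_append_right {c : String} {l1 l2 : List (String × String)}
    (h : l1.lookup c = none) : (l1 ++ l2).lookup c = l2.lookup c := by
  induction l1 with
  | nil => rfl
  | cons a t ih =>
    rw [List.cons_append]
    by_cases hb : (c == a.1) = true
    · rw [show List.lookup c (a :: t) = some a.2 from by simp [List.lookup, hb]] at h
      cases h
    · have hb' : (c == a.1) = false := by simpa using hb
      rw [show List.lookup c (a :: t) = List.lookup c t from by simp [List.lookup, hb']] at h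
      rw [show List.lookup c (a :: (t ++ l2)) = List.lookup c (t ++ l2) from by
        simp [List.lookup, hb']]
      exact ih h

lemma pv_lookup_index_some {c p : String} {groups : List (String × List String)}
    (h : (pvIndexOf groups).lookup c = some p) : p ∈ pvAllMembers groups := by
  induction groups with
  | nil => simp [pvIndexOf] at h
  | cons g rest ih =>
    rw [pv_cons_index] at h
    rw [pv_cons_members]
    by_cases hc : c ∈ g.1 :: g.2
    · have heq : some g.1 = some p :=
        (pv_lookup_append_left (pv_lookup_map_some g.1 hc)).symm.trans h
      exact List.mem_append_left _ ((Option.some_inj.mp heq) ▸ List.mem_cons_self ..)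
    · rw [pv_lookup_append_right (pv_lookup_map_none g.1 hc)] at h
      exact List.mem_append_right _ (ih h)

lemma pv_check_false_left {c1 c2 : String} {groups : List (String × List String)}
    (h : c1 ∉ pvAllMembers groups) : pvCheckGroups c1 c2 groups = false := by
  induction groups with
  | nil => rfl
  | cons g rest ih =>
    obtain ⟨p, subs⟩ := g
    rw [pv_cons_members] at h
    have h1 : c1 ∉ p :: subs := fun hm => h (List.mem_append_left _ hm)
    have h2 : c1 ∉ pvAllMembers rest := fun hm => h (List.mem_append_right _ hm)
    have hc : ((p :: subs).contains c1) = false := by simpa using h1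
    simp only [pvCheckGroups, hc, Bool.false_and, Bool.false_eq_true, if_false]
    exact ih h2

lemma pv_check_false_right {c1 c2 : String} {groups : List (String × List String)}
    (h : c2 ∉ pvAllMembers groups) : pvCheckGroups c1 c2 groups = false := by
  induction groups with
  | nil => rfl
  | cons g rest ih =>
    obtain ⟨p, subs⟩ := g
    rw [pv_cons_members] at h
    have h1 : c2 ∉ p :: subs := fun hm => h (List.mem_append_left _ hm)
    have h2 : c2 ∉ pvAllMembers rest := fun hm => h (List.mem_append_right _ hm)
    have hc : ((p :: subs).contains c2) = false := by simpa using h1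
    simp only [pvCheckGroups, hc, Bool.and_false, Bool.false_eq_true, if_false]
    exact ih h2

-- the heart: on any group list whose flattened member list has no duplicates,
-- A's loop equals B's double lookup
lemma pv_check_eq_lookup (c1 c2 : String) (groups : List (String × List String))
    (hnd : (pvAllMembers groups).Nodup) :
    pvCheckGroups c1 c2 groups =
      (match (pvIndexOf groups).lookup c1 with
       | none => false
       | some g1 => some g1 == (pvIndexOf groups).lookup c2) := by
  induction groups with
  | nil => rfl
  | cons g rest ih =>
    obtain ⟨p, subs⟩ := g
    rw [pv_cons_members, List.nodup_append] at hnd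
    obtain ⟨hm, hrest, hdisj⟩ := hnd
    rw [pv_cons_index]
    by_cases h1 : c1 ∈ p :: subs
    · by_cases h2 : c2 ∈ p :: subs
      · -- both in the current group: loop returns true, both lookups give p
        rw [pv_lookup_append_left (pv_lookup_map_some p h1),
            pv_lookup_append_left (pv_lookup_map_some p h2)]
        have hc1 : ((p :: subs).contains c1) = true := by simpa using h1
        have hc2 : ((p :: subs).contains c2) = true := by simpa using h2
        simp only [pvCheckGroups, hc1, hc2, Bool.and_self]
        simp
      · -- c1 here, c2 not: loop falls through; c1 is in no later group
        rw [pv_lookup_append_left (pv_lookup_map_some p h1),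
            pv_lookup_append_right (pv_lookup_map_none p h2)]
        have hc2 : ((p :: subs).contains c2) = false := by simpa using h2
        have hc1rest : c1 ∉ pvAllMembers rest := fun hmem => hdisj c1 h1 c1 hmem rfl
        simp only [pvCheckGroups, hc2, Bool.and_false, Bool.false_eq_true, if_false,
          pv_check_false_left hc1rest]
        cases hl : (pvIndexOf rest).lookup c2 with
        | none => simp
        | some q =>
          have hq : q ∈ pvAllMembers rest := pv_lookup_index_some hl
          have hpq : p ≠ q := hdisj p (List.mem_cons_self ..) q hq
          simp [hpq]
    · by_cases h2 : c2 ∈ p :: subs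
      · -- c2 here, c1 not
        rw [pv_lookup_append_right (pv_lookup_map_none p h1),
            pv_lookup_append_left (pv_lookup_map_some p h2)]
        have hc1 : ((p :: subs).contains c1) = false := by simpa using h1
        have hc2rest : c2 ∉ pvAllMembers rest := fun hmem => hdisj c2 h2 c2 hmem rfl
        simp only [pvCheckGroups, hc1, Bool.false_and, Bool.false_eq_true, if_false,
          pv_check_false_right hc2rest]
        cases hl : (pvIndexOf rest).lookup c1 with
        | none => simp
        | some q =>
          have hq : q ∈ pvAllMembers rest := pv_lookup_index_some hl
          have hqp : q ≠ p := fun e => hdisj p (List.mem_cons_self ..) q hq e.symm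
          simp [hqp]
      · -- neither in the current group: both sides skip it
        rw [pv_lookup_append_right (pv_lookup_map_none p h1),
            pv_lookup_append_right (pv_lookup_map_none p h2)]
        have hc1 : ((p :: subs).contains c1) = false := by simpa using h1
        simp only [pvCheckGroups, hc1, Bool.false_and, Bool.false_eq_true, if_false]
        exact ih hrest

lemma pv_groups_nodup : (pvAllMembers pvGroups).Nodup := by decide

-- ===== VERDICT (by name: the statement is the Claim_ definition above) =====
theorem is_same_group_spec : Claim_equal_is_same_group := by
  intro c1 c2 _
  unfold Spec_is_same_group is_same_group is_same_group_alt
  by_cases h0 : c1 = "" || c2 = ""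
  · simp [h0]
  · simp only [h0, Bool.false_eq_true, if_false]
    by_cases he : c1 = c2
    · simp [he]
    · simp only [he, if_false]
      exact pv_check_eq_lookup c1 c2 pvGroups pv_groups_nodup
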